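-- pv_equiv track=rewrite | github.com/lucasvduin/talgo-tracker | fix_historical_data.py | classify_train
-- ===== SOURCE A (Python) =====
-- def classify_train(unit_types):
--     ut_set = set(unit_types)
--     if any(ut in ut_set for ut in ["MFU", "ER"]):
--         return "IC3"
--     elif any(ut in ut_set for ut in ["BPD", "APT", "BPT", "BPH"]):
--         return "Talgo"
--     elif any(ut in ut_set for ut in ["AFMPZ", "AMPZ", "BRMPZ", "BBMPZ", "BMPZ", "BDMPZ"]):
--         return "Railjet"
--     elif any(ut in ut_set for ut in ["BV", "BPX", "AV", "BVS", "BPB"]):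
--         return "German IC Coaches"
--     elif ut_set == {"EB"}:
--         return "Vectron-hauled"
--     else:
--         return "Unknown"
-- ===== SOURCE B (Python) =====
-- _PRIORITY = {
--     "MFU": 0, "ER": 0,
--     "BPD": 1, "APT": 1, "BPT": 1, "BPH": 1,
--     "AFMPZ": 2, "AMPZ": 2, "BRMPZ": 2, "BBMPZ": 2, "BMPZ": 2, "BDMPZ": 2,
--     "BV": 3, "BPX": 3, "AV": 3, "BVS": 3, "BPB": 3,
-- }
-- _LABELS = ["IC3", "Talgo", "Railjet", "German IC Coaches"]
--
-- def classify_train(unit_types):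
--     best = None
--     for ut in unit_types:
--         p = _PRIORITY.get(ut)
--         if p is not None and (best is None or p < best):
--             best = p
--     if best is not None:
--         return _LABELS[best]
--     if set(unit_types) == {"EB"}:
--         return "Vectron-hauled"
--     return "Unknown"
-- ===== Notes on version B (the rewrite author's own statement) =====
-- stated objective: idiomatic
-- what changed: Replaces the four per-category any()-membership scans with a single pass over unit_types that looks each code up in one precomputed code->priority dict and keeps the minimum priority, then maps the priority to its label.
import Mathlib
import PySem

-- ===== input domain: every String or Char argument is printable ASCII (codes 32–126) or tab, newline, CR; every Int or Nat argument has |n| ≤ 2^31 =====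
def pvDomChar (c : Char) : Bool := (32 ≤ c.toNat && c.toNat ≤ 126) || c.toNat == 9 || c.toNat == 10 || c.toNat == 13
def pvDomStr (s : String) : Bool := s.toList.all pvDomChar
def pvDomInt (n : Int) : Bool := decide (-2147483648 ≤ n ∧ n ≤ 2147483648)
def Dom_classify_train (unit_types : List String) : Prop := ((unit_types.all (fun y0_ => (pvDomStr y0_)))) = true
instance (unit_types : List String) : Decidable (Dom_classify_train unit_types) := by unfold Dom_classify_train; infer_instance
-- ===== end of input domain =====

-- B replaces the four per-category membership scans with one pass over the input
-- keeping the minimum priority from a precomputed code->priority dict (idiomatic rewrite).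


-- ===== PORT A =====
def classify_train (unit_types : List String) : String :=
  let ut_set : PySem.Set String := PySem.Set.ofList unit_types
  if (["MFU", "ER"].any (fun ut => PySem.Set.contains ut_set ut)) then "IC3"
  else if (["BPD", "APT", "BPT", "BPH"].any (fun ut => PySem.Set.contains ut_set ut)) then "Talgo"
  else if (["AFMPZ", "AMPZ", "BRMPZ", "BBMPZ", "BMPZ", "BDMPZ"].any (fun ut => PySem.Set.contains ut_set ut)) then "Railjet"
  else if (["BV", "BPX", "AV", "BVS", "BPB"].any (fun ut => PySem.Set.contains ut_set ut)) then "German IC Coaches"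
  else if PySem.Set.equal ut_set (PySem.Set.ofList ["EB"]) then "Vectron-hauled"
  else "Unknown"

-- ===== PORT B =====
-- module constant _PRIORITY of Source B
def pvPriority : PySem.Dict String Int := PySem.Dict.ofList
  [("MFU", 0), ("ER", 0),
   ("BPD", 1), ("APT", 1), ("BPT", 1), ("BPH", 1),
   ("AFMPZ", 2), ("AMPZ", 2), ("BRMPZ", 2), ("BBMPZ", 2), ("BMPZ", 2), ("BDMPZ", 2),
   ("BV", 3), ("BPX", 3), ("AV", 3), ("BVS", 3), ("BPB", 3)]

-- module constant _LABELS of Source B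
def pvLabels : List String := ["IC3", "Talgo", "Railjet", "German IC Coaches"]

-- the body of Source B's for-loop
def pvStep (best : Option Int) (ut : String) : Option Int :=
  match pvPriority.get? ut with
  | none => best
  | some p => match best with
              | none => some p
              | some b => if p < b then some p else best

def classify_train_alt (unit_types : List String) : String :=
  let best := unit_types.foldl pvStep none
  match best with
  | some b => (PySem.List.pyGet? pvLabels b).getD ""   -- _LABELS[best]; best is always 0..3, so in range
  | none =>
    if PySem.Set.equal (PySem.Set.ofList unit_types) (PySem.Set.ofList ["EB"]) then "Vectron-hauled"
    else "Unknown"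

-- ===== PRECONDITION & SPEC =====
def Spec_classify_train (unit_types : List String) (out : String) : Prop := out = classify_train_alt unit_types
instance (unit_types : List String) (out : String) : Decidable (Spec_classify_train unit_types out) := by unfold Spec_classify_train; infer_instance

-- ===== CLAIM (what is proved, stated in full; the proofs are below) =====
def Claim_equal_classify_train : Prop := ∀ (unit_types : List String), Dom_classify_train unit_types → Spec_classify_train unit_types (classify_train unit_types)

-- ===== LEMMAS AND PROOFS =====

lemma pvStep_eq_none_iff (acc : Option Int) (s : String) :
    pvStep acc s = none ↔ acc = none ∧ pvPriority.get? s = none := by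
  rcases hp : pvPriority.get? s with _ | p <;> rcases acc with _ | b <;>
    simp [pvStep, hp]
  split <;> simp

-- the fold result is none exactly when no element is in the priority table
lemma fold_none_iff (xs : List String) (acc : Option Int) :
    xs.foldl pvStep acc = none ↔ acc = none ∧ ∀ s ∈ xs, pvPriority.get? s = none := by
  induction xs generalizing acc with
  | nil => simp
  | cons h t ih =>
    rw [List.foldl_cons, ih, pvStep_eq_none_iff]
    simp only [List.mem_cons]
    constructor
    · rintro ⟨⟨ha, hh⟩, hall⟩
      exact ⟨ha, fun s hs => by rcases hs with rfl | hs; exact hh; exact hall s hs⟩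
    · rintro ⟨ha, hall⟩
      exact ⟨⟨ha, hall h (Or.inl rfl)⟩, fun s hs => hall s (Or.inr hs)⟩

lemma pvStep_some (acc : Option Int) (hd : String) (q : Int) (hq : pvStep acc hd = some q) :
    (acc = some q ∨ pvPriority.get? hd = some q) ∧ (∀ r, acc = some r → q ≤ r) ∧
    (∀ r, pvPriority.get? hd = some r → q ≤ r) := by
  cases hp : pvPriority.get? hd with
  | none =>
    have hq' : acc = some q := by rw [show pvStep acc hd = acc from by simp [pvStep, hp]] at hq; exact hq
    refine ⟨Or.inl hq', fun r hr => ?_, fun r hr => by cases hr⟩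
    rw [hq'] at hr; injection hr with hr; omega
  | some v =>
    cases acc with
    | none =>
      have hq' : q = v := by simpa [pvStep, hp] using hq.symm
      refine ⟨Or.inr (by rw [hq']), by simp, fun r hr => ?_⟩
      injection hr with hr; omega
    | some b =>
      by_cases hvb : v < b
      · have hq' : q = v := by simpa [pvStep, hp, hvb] using hq.symm
        refine ⟨Or.inr (by rw [hq']), fun r hr => ?_, fun r hr => ?_⟩
        · injection hr with hr; omega
        · injection hr with hr; omega
      · have hq' : q = b := by simpa [pvStep, hp, hvb] using hq.symm
        refine ⟨Or.inl (by rw [hq']), fun r hr => ?_, fun r hr => ?_⟩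
        · injection hr with hr; omega
        · injection hr with hr; omega

-- a some-result of the fold is the priority of some element and a lower bound on all of them
lemma fold_some (xs : List String) (acc : Option Int) (p : Int)
    (h : xs.foldl pvStep acc = some p) :
    (acc = some p ∨ ∃ s ∈ xs, pvPriority.get? s = some p) ∧
    (∀ q, acc = some q → p ≤ q) ∧
    (∀ s ∈ xs, ∀ q, pvPriority.get? s = some q → p ≤ q) := by
  induction xs generalizing acc with
  | nil => simp_all
  | cons hd t ih =>
    simp only [List.foldl_cons] at h
    obtain ⟨hsrc, hacc, hall⟩ := ih _ h
    cases hfa : pvStep acc hd with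
    | none =>
      obtain ⟨han, hpn⟩ := (pvStep_eq_none_iff acc hd).mp hfa
      refine ⟨?_, ?_, ?_⟩
      · rcases hsrc with hs | ⟨s, hsm, hsp⟩
        · rw [hfa] at hs; cases hs
        · exact Or.inr ⟨s, List.mem_cons_of_mem _ hsm, hsp⟩
      · intro q hq; rw [han] at hq; cases hq
      · intro s hsm q hq
        rcases List.mem_cons.mp hsm with rfl | hsm
        · rw [hpn] at hq; cases hq
        · exact hall s hsm q hq
    | some w =>
      obtain ⟨hwsrc, hwacc, hwprio⟩ := pvStep_some acc hd w hfa
      have hpw : p ≤ w := hacc _ hfa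
      refine ⟨?_, ?_, ?_⟩
      · rcases hsrc with hs | ⟨s, hsm, hsp⟩
        · rw [hfa] at hs; injection hs with hs; subst hs
          rcases hwsrc with h1 | h1
          · exact Or.inl h1
          · exact Or.inr ⟨hd, List.mem_cons_self .., h1⟩
        · exact Or.inr ⟨s, List.mem_cons_of_mem _ hsm, hsp⟩
      · intro q hq
        have := hwacc _ hq
        omega
      · intro s hsm q hq
        rcases List.mem_cons.mp hsm with rfl | hsm
        · have := hwprio _ hq
          omega
        · exact hall s hsm q hq

-- if some element has priority k and none has a smaller one, the fold yields exactly k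
lemma fold_exact (xs : List String) (k : Int)
    (hex : ∃ s ∈ xs, pvPriority.get? s = some k)
    (hmin : ∀ s ∈ xs, ∀ q, pvPriority.get? s = some q → k ≤ q) :
    xs.foldl pvStep none = some k := by
  cases hf : xs.foldl pvStep (none : Option Int) with
  | none =>
    rw [fold_none_iff] at hf
    obtain ⟨s, hsm, hsp⟩ := hex
    exact absurd (hf.2 s hsm) (by simp [hsp])
  | some p =>
    obtain ⟨hsrc, -, hall⟩ := fold_some _ _ _ hf
    obtain ⟨s, hsm, hsp⟩ := hex
    have h1 : p ≤ k := hall s hsm k hsp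
    rcases hsrc with h | ⟨t, htm, htp⟩
    · simp at h
    · have h2 : k ≤ p := hmin t htm p htp
      have : p = k := le_antisymm h1 h2
      rw [this]

-- closed form of the dict lookup
set_option maxHeartbeats 1000000 in
lemma prio_eq (s : String) : pvPriority.get? s =
    if "MFU" = s ∨ "ER" = s then some 0
    else if "BPD" = s ∨ "APT" = s ∨ "BPT" = s ∨ "BPH" = s then some 1
    else if "AFMPZ" = s ∨ "AMPZ" = s ∨ "BRMPZ" = s ∨ "BBMPZ" = s ∨ "BMPZ" = s ∨ "BDMPZ" = s then some 2
    else if "BV" = s ∨ "BPX" = s ∨ "AV" = s ∨ "BVS" = s ∨ "BPB" = s then some 3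
    else none := by
  have hlit : pvPriority = PySem.Dict.mk
      [("MFU", 0), ("ER", 0),
       ("BPD", 1), ("APT", 1), ("BPT", 1), ("BPH", 1),
       ("AFMPZ", 2), ("AMPZ", 2), ("BRMPZ", 2), ("BBMPZ", 2), ("BMPZ", 2), ("BDMPZ", 2),
       ("BV", 3), ("BPX", 3), ("AV", 3), ("BVS", 3), ("BPB", 3)] := by decide
  have hnil : (PySem.Dict.mk ([] : List (String × Int))).get? s = none := rfl
  rw [hlit]
  simp only [PySem.Dict.get?_mk_cons, beq_iff_eq, hnil]
  by_cases h1 : "MFU" = s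
  · simp [← h1]
  by_cases h2 : "ER" = s
  · simp [← h2]
  by_cases h3 : "BPD" = s
  · simp [← h3]
  by_cases h4 : "APT" = s
  · simp [← h4]
  by_cases h5 : "BPT" = s
  · simp [← h5]
  by_cases h6 : "BPH" = s
  · simp [← h6]
  by_cases h7 : "AFMPZ" = s
  · simp [← h7]
  by_cases h8 : "AMPZ" = s
  · simp [← h8]
  by_cases h9 : "BRMPZ" = s
  · simp [← h9]
  by_cases h10 : "BBMPZ" = s
  · simp [← h10]
  by_cases h11 : "BMPZ" = s
  · simp [← h11]
  by_cases h12 : "BDMPZ" = s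
  · simp [← h12]
  by_cases h13 : "BV" = s
  · simp [← h13]
  by_cases h14 : "BPX" = s
  · simp [← h14]
  by_cases h15 : "AV" = s
  · simp [← h15]
  by_cases h16 : "BVS" = s
  · simp [← h16]
  by_cases h17 : "BPB" = s
  · simp [← h17]
  simp [h1, h2, h3, h4, h5, h6, h7, h8, h9, h10, h11, h12, h13, h14, h15, h16, h17]

lemma prio_range {s : String} {p : Int} (h : pvPriority.get? s = some p) :
    p = 0 ∨ p = 1 ∨ p = 2 ∨ p = 3 := by
  rw [prio_eq] at h
  split_ifs at h <;> simp_all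

lemma contains_ofList (xs : List String) (s : String) :
    PySem.Set.contains (PySem.Set.ofList xs) s = true ↔ s ∈ xs := by
  rw [PySem.Set.contains_iff, PySem.Set.mem_ofList]

-- A's per-category scan = existence of an element of that priority
lemma cond_iff_exists (xs : List String) (k : Int) (grp : List String)
    (hg : ∀ s, pvPriority.get? s = some k ↔ s ∈ grp) :
    (grp.any (fun ut => PySem.Set.contains (PySem.Set.ofList xs) ut)) = true ↔
      ∃ s ∈ xs, pvPriority.get? s = some k := by
  simp only [List.any_eq_true, contains_ofList]
  constructor
  · rintro ⟨ut, hutg, hutm⟩; exact ⟨ut, hutm, (hg ut).mpr hutg⟩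
  · rintro ⟨s, hsm, hsp⟩; exact ⟨s, (hg s).mp hsp, hsm⟩

lemma hg0 (s : String) : pvPriority.get? s = some 0 ↔ s ∈ (["MFU", "ER"] : List String) := by
  constructor
  · intro h; rw [prio_eq] at h; split_ifs at h with h1 h2 h3 h4
    · rcases h1 with rfl | rfl <;> simp
    · exact absurd h (by decide)
    · exact absurd h (by decide)
    · exact absurd h (by decide)
  · intro h; rw [prio_eq]
    simp only [List.mem_cons, List.not_mem_nil, or_false] at h
    rcases h with rfl | rfl <;> simp

lemma hg1 (s : String) : pvPriority.get? s = some 1 ↔ s ∈ (["BPD", "APT", "BPT", "BPH"] : List String) := by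
  constructor
  · intro h; rw [prio_eq] at h; split_ifs at h with h1 h2 h3 h4
    · exact absurd h (by decide)
    · rcases h2 with rfl | rfl | rfl | rfl <;> simp
    · exact absurd h (by decide)
    · exact absurd h (by decide)
  · intro h; rw [prio_eq]
    simp only [List.mem_cons, List.not_mem_nil, or_false] at h
    rcases h with rfl | rfl | rfl | rfl <;> simp

lemma hg2 (s : String) : pvPriority.get? s = some 2 ↔ s ∈ (["AFMPZ", "AMPZ", "BRMPZ", "BBMPZ", "BMPZ", "BDMPZ"] : List String) := by
  constructor
  · intro h; rw [prio_eq] at h; split_ifs at h with h1 h2 h3 h4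
    · exact absurd h (by decide)
    · exact absurd h (by decide)
    · rcases h3 with rfl | rfl | rfl | rfl | rfl | rfl <;> simp
    · exact absurd h (by decide)
  · intro h; rw [prio_eq]
    simp only [List.mem_cons, List.not_mem_nil, or_false] at h
    rcases h with rfl | rfl | rfl | rfl | rfl | rfl <;> simp

lemma hg3 (s : String) : pvPriority.get? s = some 3 ↔ s ∈ (["BV", "BPX", "AV", "BVS", "BPB"] : List String) := by
  constructor
  · intro h; rw [prio_eq] at h; split_ifs at h with h1 h2 h3 h4
    · exact absurd h (by decide)
    · exact absurd h (by decide)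
    · exact absurd h (by decide)
    · rcases h4 with rfl | rfl | rfl | rfl | rfl <;> simp
  · intro h; rw [prio_eq]
    simp only [List.mem_cons, List.not_mem_nil, or_false] at h
    rcases h with rfl | rfl | rfl | rfl | rfl <;> simp

-- ===== VERDICT (by name: the statement is the Claim_ definition above) =====
theorem classify_train_spec : Claim_equal_classify_train := by
  intro xs _
  unfold Spec_classify_train
  have e0 := cond_iff_exists xs 0 _ hg0
  have e1 := cond_iff_exists xs 1 _ hg1
  have e2 := cond_iff_exists xs 2 _ hg2
  have e3 := cond_iff_exists xs 3 _ hg3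
  simp only [classify_train, classify_train_alt]
  by_cases h0 : ∃ s ∈ xs, pvPriority.get? s = some 0
  · rw [if_pos (e0.mpr h0),
      fold_exact xs 0 h0 (fun s hs q hq => by rcases prio_range hq with rfl | rfl | rfl | rfl <;> omega)]
    rfl
  · rw [if_neg (fun hc => h0 (e0.mp hc))]
    by_cases h1 : ∃ s ∈ xs, pvPriority.get? s = some 1
    · rw [if_pos (e1.mpr h1),
        fold_exact xs 1 h1 (fun s hs q hq => by
          rcases prio_range hq with rfl | rfl | rfl | rfl
          · exact absurd ⟨s, hs, hq⟩ h0
          all_goals omega)]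
      rfl
    · rw [if_neg (fun hc => h1 (e1.mp hc))]
      by_cases h2 : ∃ s ∈ xs, pvPriority.get? s = some 2
      · rw [if_pos (e2.mpr h2),
          fold_exact xs 2 h2 (fun s hs q hq => by
            rcases prio_range hq with rfl | rfl | rfl | rfl
            · exact absurd ⟨s, hs, hq⟩ h0
            · exact absurd ⟨s, hs, hq⟩ h1
            all_goals omega)]
        rfl
      · rw [if_neg (fun hc => h2 (e2.mp hc))]
        by_cases h3 : ∃ s ∈ xs, pvPriority.get? s = some 3
        · rw [if_pos (e3.mpr h3),
            fold_exact xs 3 h3 (fun s hs q hq => by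
              rcases prio_range hq with rfl | rfl | rfl | rfl
              · exact absurd ⟨s, hs, hq⟩ h0
              · exact absurd ⟨s, hs, hq⟩ h1
              · exact absurd ⟨s, hs, hq⟩ h2
              omega)]
          rfl
        · rw [if_neg (fun hc => h3 (e3.mp hc))]
          have hnone : ∀ s ∈ xs, pvPriority.get? s = none := by
            intro s hs
            cases hp : pvPriority.get? s with
            | none => rfl
            | some p =>
              rcases prio_range hp with rfl | rfl | rfl | rfl
              · exact absurd ⟨s, hs, hp⟩ h0
              · exact absurd ⟨s, hs, hp⟩ h1
              · exact absurd ⟨s, hs, hp⟩ h2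
              · exact absurd ⟨s, hs, hp⟩ h3
          rw [(fold_none_iff xs none).mpr ⟨rfl, hnone⟩]
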